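-- pv_equiv track=rewrite | github.com/Yash9988/self-learn | DP/nPairing.py | nPairing_
-- ===== SOURCE A (Python) =====
-- def nPairing_(n: int) -> int:
--
--     # O(n) Space
--     # a = [1, 2]
--     # for i in range(3, n + 1):
--     #     a.append(a[-1] + (i - 1) * a[-2])
--     #
--     # return a[-1]
--
--     # O(1) Space
--     if n in {1, 2}:                     # Base cases
--         return n
--
--     a, b = 1, 2
--     i = 2                               # Initialise iterator
--     while (i := i + 1) <= n:            # Increment and iterate to N
--         a, b = b, b + (i - 1) * a       # Update for relevant indexes
--     return b                            # Return the result
-- ===== SOURCE B (Python) =====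
-- def nPairing_(n: int) -> int:
--     # Closed-form involution count: I(n) = sum_k n! / (2**k * k! * (n-2k)!),
--     # summed over the number k of pairs; the k-th summand is maintained
--     # multiplicatively (every division below is exact).
--     if n == 1:
--         return 1
--     if n < 3:
--         return 2
--     t = 1
--     total = 1
--     for k in range(n // 2):
--         t = t * (n - 2 * k) * (n - 2 * k - 1) // (2 * (k + 1))
--         total += t
--     return total
-- ===== Notes on version B (the rewrite author's own statement) =====
-- stated objective: alternative
-- what changed: Replaces the two-term recurrence loop threading (a,b) by the explicit combinatorial sum I(n) = sum_{k<=n//2} n!/(2^k k! (n-2k)!) over the number k of pairs, with the k-th summand maintained multiplicatively by an exact integer division per step.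
import Mathlib
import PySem

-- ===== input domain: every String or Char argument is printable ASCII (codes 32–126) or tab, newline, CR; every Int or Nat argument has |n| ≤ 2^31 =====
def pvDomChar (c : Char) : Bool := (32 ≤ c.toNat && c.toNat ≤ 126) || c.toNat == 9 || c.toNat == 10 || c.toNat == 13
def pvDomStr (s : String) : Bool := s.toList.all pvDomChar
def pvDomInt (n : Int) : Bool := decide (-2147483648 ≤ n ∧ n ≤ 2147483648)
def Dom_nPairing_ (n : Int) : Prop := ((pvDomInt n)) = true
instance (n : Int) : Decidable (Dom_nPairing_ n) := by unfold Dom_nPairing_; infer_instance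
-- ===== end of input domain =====

-- B replaces A's two-term recurrence loop by the explicit involution-count sum
-- I(n) = Σ_{k=0}^{n//2} n! / (2^k · k! · (n-2k)!); same cost, different decomposition.

-- ===== PORT A =====
-- while (i := i + 1) <= n: a, b = b, b + (i - 1) * a
def nPairingGo (n a b i : Int) : Int :=
  if i + 1 ≤ n then nPairingGo n b (b + ((i + 1) - 1) * a) (i + 1) else b
termination_by (n - i).toNat
decreasing_by omega

def nPairing_ (n : Int) : Int :=
  if n = 1 ∨ n = 2 then n
  else nPairingGo n 1 2 2

-- ===== PORT B =====
-- t, total = 1, 1; for k in range(n // 2): t = t*(n-2k)*(n-2k-1) // (2*(k+1)); total += t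
def nPairing__alt (n : Int) : Int :=
  if n = 1 then 1
  else if n < 3 then 2
  else
    ((PySem.List.pyRange 0 (PySem.Int.floordiv n 2) 1).foldl
      (fun (p : Int × Int) k =>
        let t := PySem.Int.floordiv (p.1 * (n - 2 * k) * (n - 2 * k - 1)) (2 * (k + 1))
        (t, p.2 + t)) (1, 1)).2

-- ===== PRECONDITION & SPEC =====
def Spec_nPairing_ (n : Int) (out : Int) : Prop := out = nPairing__alt n
instance (n : Int) (out : Int) : Decidable (Spec_nPairing_ n out) := by unfold Spec_nPairing_; infer_instance

-- ===== CLAIM (what is proved, stated in full; the proofs are below) =====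
def Claim_equal_nPairing_ : Prop := ∀ (n : Int), Dom_nPairing_ n → Spec_nPairing_ n (nPairing_ n)

-- ===== LEMMAS AND PROOFS =====

-- (2k-1)!! : product of the first k odd numbers
def dOdd : Nat → Nat
  | 0 => 1
  | (j + 1) => (2 * j + 1) * dOdd j

-- the k-th summand of the involution count, division-free
def pTerm (n k : Nat) : Nat := dOdd k * n.choose (2 * k)

-- the involution count as a sum (range n+2 is past every nonzero term)
def pSum (n : Nat) : Nat := ∑ k ∈ Finset.range (n + 2), pTerm n k

theorem pTerm_zero {n k : Nat} (h : n < 2 * k) : pTerm n k = 0 := by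
  simp [pTerm, Nat.choose_eq_zero_of_lt h]

theorem sum_pTerm_ext {n : Nat} {a b : Nat} (hab : a ≤ b) (ha : n < 2 * a) :
    ∑ k ∈ Finset.range b, pTerm n k = ∑ k ∈ Finset.range a, pTerm n k := by
  have hsub : Finset.range a ⊆ Finset.range b := by
    intro x hx; simp only [Finset.mem_range] at hx ⊢; omega
  refine (Finset.sum_subset hsub ?_).symm
  intro k hk hk'
  simp only [Finset.mem_range] at hk hk'
  exact pTerm_zero (by omega)

theorem sum_pTerm_eq {n a : Nat} (ha : n < 2 * a) :
    ∑ k ∈ Finset.range a, pTerm n k = pSum n := by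
  rcases le_total a (n + 2) with h | h
  · exact (sum_pTerm_ext h ha).symm
  · exact sum_pTerm_ext h (by omega)

theorem pTerm_rec (m j : Nat) :
    pTerm (m + 2) (j + 1) = pTerm (m + 1) (j + 1) + (m + 1) * pTerm m j := by
  have pascal : (m + 2).choose (2 * (j + 1)) =
      (m + 1).choose (2 * j + 1) + (m + 1).choose (2 * (j + 1)) := by
    have h : 2 * (j + 1) = (2 * j + 1) + 1 := by ring
    rw [h]
    exact Nat.choose_succ_succ (m + 1) (2 * j + 1)
  have hs : (m + 1) * m.choose (2 * j) = (m + 1).choose (2 * j + 1) * (2 * j + 1) := by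
    simpa [Nat.succ_eq_add_one] using Nat.add_one_mul_choose_eq m (2 * j)
  simp only [pTerm, dOdd, pascal]
  calc (2 * j + 1) * dOdd j * ((m + 1).choose (2 * j + 1) + (m + 1).choose (2 * (j + 1)))
      = (2 * j + 1) * dOdd j * (m + 1).choose (2 * (j + 1)) +
        dOdd j * ((m + 1).choose (2 * j + 1) * (2 * j + 1)) := by ring
    _ = (2 * j + 1) * dOdd j * (m + 1).choose (2 * (j + 1)) +
        (m + 1) * (dOdd j * m.choose (2 * j)) := by rw [← hs]; ring

theorem pSum_rec (m : Nat) : pSum (m + 2) = pSum (m + 1) + (m + 1) * pSum m := by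
  have h1 : pSum (m + 2) = ∑ k ∈ Finset.range (m + 3 + 1), pTerm (m + 2) k := rfl
  rw [h1, Finset.sum_range_succ' (pTerm (m + 2)) (m + 3)]
  have h2 : ∀ j ∈ Finset.range (m + 3), pTerm (m + 2) (j + 1) =
      pTerm (m + 1) (j + 1) + (m + 1) * pTerm m j := fun j _ => pTerm_rec m j
  have h3 : ∑ j ∈ Finset.range (m + 3), pTerm m j = pSum m := sum_pTerm_eq (by omega)
  have h4 : (∑ j ∈ Finset.range (m + 3), pTerm (m + 1) (j + 1)) + pTerm (m + 1) 0 =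
      pSum (m + 1) := by
    rw [← Finset.sum_range_succ' (pTerm (m + 1)) (m + 3)]
    exact sum_pTerm_eq (by omega)
  have h0 : pTerm (m + 2) 0 = pTerm (m + 1) 0 := by simp [pTerm]
  rw [Finset.sum_congr rfl h2, Finset.sum_add_distrib, ← Finset.mul_sum, h3, h0]
  omega

theorem pSum_one : pSum 1 = 1 := by decide
theorem pSum_two : pSum 2 = 2 := by decide

theorem pTerm_step (n k : Nat) :
    pTerm n k * ((n - 2 * k) * (n - 2 * k - 1)) = pTerm n (k + 1) * (2 * (k + 1)) := by
  have h1 := Nat.choose_succ_right_eq n (2 * k)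
  have h2 := Nat.choose_succ_right_eq n (2 * k + 1)
  have e1 : n - 2 * k - 1 = n - (2 * k + 1) := by omega
  have e2 : 2 * (k + 1) = 2 * k + 1 + 1 := by ring
  simp only [pTerm, dOdd, e1, e2]
  calc dOdd k * n.choose (2 * k) * ((n - 2 * k) * (n - (2 * k + 1)))
      = dOdd k * (n.choose (2 * k) * (n - 2 * k)) * (n - (2 * k + 1)) := by ring
    _ = dOdd k * (n.choose (2 * k + 1) * (2 * k + 1)) * (n - (2 * k + 1)) := by rw [h1]
    _ = dOdd k * (2 * k + 1) * (n.choose (2 * k + 1) * (n - (2 * k + 1))) := by ring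
    _ = dOdd k * (2 * k + 1) * (n.choose (2 * k + 1 + 1) * (2 * k + 1 + 1)) := by rw [h2]
    _ = (2 * k + 1) * dOdd k * n.choose (2 * k + 1 + 1) * (2 * k + 1 + 1) := by ring

theorem alt_eq_pSum (n : Nat) (h3 : 3 ≤ n) : nPairing__alt (n : Int) = ((pSum n : Nat) : Int) := by
  rw [nPairing__alt]
  rw [if_neg (by omega), if_neg (by omega)]
  have hfd : PySem.Int.floordiv (n : Int) 2 = ((n / 2 : Nat) : Int) := by
    exact_mod_cast PySem.Int.floordiv_natCast n 2
  have hrange : PySem.List.pyRange 0 (PySem.Int.floordiv (n : Int) 2) 1 =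
      (List.range (n / 2)).map (fun k : Nat => (k : Int)) := by
    rw [hfd, PySem.List.pyRange_one]
    have h2 : (((n / 2 : Nat) : Int) - 0).toNat = n / 2 := by omega
    rw [h2]
    exact List.map_congr_left (fun k _ => by simp)
  rw [hrange, List.foldl_map]
  have main : ∀ m : Nat, m ≤ n / 2 →
      List.foldl (fun (p : Int × Int) (k : Nat) =>
          let t := PySem.Int.floordiv (p.1 * ((n : Int) - 2 * (k : Int)) * ((n : Int) - 2 * (k : Int) - 1))
            (2 * ((k : Int) + 1))
          (t, p.2 + t)) (1, 1) (List.range m)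
        = (((pTerm n m : Nat) : Int), ((∑ k ∈ Finset.range (m + 1), pTerm n k : Nat) : Int)) := by
    intro m
    induction m with
    | zero => intro _; simp [pTerm, dOdd]
    | succ p ih =>
      intro hp
      rw [List.range_succ, List.foldl_append, ih (by omega), List.foldl_cons, List.foldl_nil]
      have hpn : 2 * p + 2 ≤ n := by omega
      have ht : PySem.Int.floordiv
          (((pTerm n p : Nat) : Int) * ((n : Int) - 2 * (p : Int)) * ((n : Int) - 2 * (p : Int) - 1))
          (2 * ((p : Int) + 1)) = ((pTerm n (p + 1) : Nat) : Int) := by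
        have hpos : (0 : Int) < 2 * ((p : Int) + 1) := by positivity
        have hnum : ((pTerm n p : Nat) : Int) * ((n : Int) - 2 * (p : Int)) * ((n : Int) - 2 * (p : Int) - 1)
            = ((pTerm n (p + 1) : Nat) : Int) * (2 * ((p : Int) + 1)) := by
          have c1 : ((n : Int) - 2 * (p : Int)) = ((n - 2 * p : Nat) : Int) := by omega
          have c2 : ((n : Int) - 2 * (p : Int) - 1) = ((n - 2 * p - 1 : Nat) : Int) := by omega
          have c3 : (2 * ((p : Int) + 1)) = ((2 * (p + 1) : Nat) : Int) := by push_cast; ring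
          have hnat : pTerm n p * (n - 2 * p) * (n - 2 * p - 1) = pTerm n (p + 1) * (2 * (p + 1)) := by
            rw [mul_assoc]; exact pTerm_step n p
          rw [c2, c1, c3]
          exact_mod_cast hnat
        rw [PySem.Int.floordiv_eq_ediv_of_pos hpos, hnum,
          Int.mul_ediv_cancel _ (ne_of_gt hpos)]
      simp only [ht, Finset.sum_range_succ, Prod.mk.injEq]
      refine ⟨trivial, ?_⟩
      push_cast
      ring
  rw [main (n / 2) le_rfl]
  simp only []
  exact_mod_cast sum_pTerm_eq (show n < 2 * (n / 2 + 1) by omega)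

theorem go_invariant (n : Int) : ∀ (fuel : Nat) (i : Int), (n - i).toNat = fuel → 2 ≤ i → i ≤ n →
    nPairingGo n ((pSum (i - 1).toNat : Nat) : Int) ((pSum i.toNat : Nat) : Int) i
      = ((pSum n.toNat : Nat) : Int) := by
  intro fuel
  induction fuel with
  | zero =>
    intro i hf h2 hn
    have : i = n := by omega
    rw [nPairingGo, if_neg (by omega), this]
  | succ f ih =>
    intro i hf h2 hn
    rw [nPairingGo]
    by_cases hlt : i + 1 ≤ n
    · rw [if_pos hlt]
      have hb : ((pSum i.toNat : Nat) : Int) + ((i + 1) - 1) * ((pSum (i - 1).toNat : Nat) : Int)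
          = ((pSum (i + 1).toNat : Nat) : Int) := by
        obtain ⟨p, hp⟩ : ∃ p : Nat, i.toNat = p + 2 := ⟨i.toNat - 2, by omega⟩
        have h1 : (i + 1).toNat = (p + 1) + 2 := by omega
        have h2' : (i - 1).toNat = p + 1 := by omega
        have hi : ((i + 1) - 1) = ((p + 2 : Nat) : Int) := by push_cast; omega
        rw [h1, hp, h2', pSum_rec (p + 1), hi]
        push_cast
        ring
      rw [hb]
      have := ih (i + 1) (by omega) (by omega) hlt
      have hi1 : ((i + 1) - 1).toNat = i.toNat := by omega
      rw [hi1] at this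
      exact this
    · rw [if_neg hlt]
      have : i = n := by omega
      rw [this]

-- ===== VERDICT (by name: the statement is the Claim_ definition above) =====
theorem nPairing__spec : Claim_equal_nPairing_ := by
  intro n _
  unfold Spec_nPairing_
  by_cases h1 : n = 1
  · subst h1; decide
  · by_cases h2 : n = 2
    · subst h2; decide
    · by_cases h3 : n < 3
      · -- A: base guard false, loop never runs, returns 2; B: returns 2
        rw [nPairing_, if_neg (by omega), nPairingGo, if_neg (by omega),
          nPairing__alt, if_neg h1, if_pos h3]
      · -- n ≥ 3
        have hn3 : (3 : Int) ≤ n := by omega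
        have hnn : n = ((n.toNat : Nat) : Int) := by omega
        rw [nPairing_, if_neg (by omega)]
        have hA := go_invariant n (n - 2).toNat 2 rfl (by omega) (by omega)
        have hs1 : ((2 : Int) - 1).toNat = 1 := by decide
        have hs2 : (2 : Int).toNat = 2 := by decide
        rw [hs1, hs2, pSum_one, pSum_two] at hA
        norm_num at hA
        have hB : nPairing__alt n = ((pSum n.toNat : Nat) : Int) := by
          rw [hnn]; exact alt_eq_pSum n.toNat (by omega)
        rw [hB, ← hA]
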